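-- pv_equiv track=rewrite | github.com/vpetrigo/courses | programming/adaptive-python/group_2/largest_cons_div_seq.py | largest_cons_div_seq
-- ===== SOURCE A (Python) =====
-- def largest_cons_div_seq(seq):
--     seq_len = len(seq)
--     count_arr = [1 for _ in range(seq_len)]
--
--     for i in range(seq_len):
--         for j in range(i):
--             if seq[i] >= seq[j] and seq[i] % seq[j] == 0:
--                 count_arr[i] = max(count_arr[i], count_arr[j] + 1)
--
--     return max(count_arr)
-- ===== SOURCE B (Python) =====
-- def largest_cons_div_seq(seq):
--     # value -> length of the longest divisibility chain ending at this value so far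
--     best = {}
--     ans = 0
--     for x in seq:
--         cur = 1
--         if x == 0:
--             # 0 is divisible by every nonzero value; the chain also needs v <= 0
--             for v, c in best.items():
--                 if v < 0:
--                     cur = max(cur, c + 1)
--         else:
--             # enumerate the divisors of x by trial division and look them up
--             m = abs(x)
--             d = 1
--             while d * d <= m:
--                 if m % d == 0:
--                     for q in (d, m // d):
--                         for v in (q, -q):
--                             if v <= x and v in best:
--                                 cur = max(cur, best[v] + 1)
--                 d += 1
--         if best.get(x, 0) < cur:
--             best[x] = cur
--         if cur > ans:
--             ans = cur
--     return ans
-- ===== Notes on version B (the rewrite author's own statement) =====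
-- stated objective: faster
-- what changed: Instead of A's quadratic DP that rescans all earlier positions per element, B keeps one dict value->best chain length and, per element x, enumerates the divisors of x by trial division up to sqrt(|x|) and looks each candidate divisor up in the dict (a dict scan only in the special x==0 case).
-- outside the precondition, e.g. on largest_cons_div_seq([]): A raises ValueError, B returns 0
import Mathlib
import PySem

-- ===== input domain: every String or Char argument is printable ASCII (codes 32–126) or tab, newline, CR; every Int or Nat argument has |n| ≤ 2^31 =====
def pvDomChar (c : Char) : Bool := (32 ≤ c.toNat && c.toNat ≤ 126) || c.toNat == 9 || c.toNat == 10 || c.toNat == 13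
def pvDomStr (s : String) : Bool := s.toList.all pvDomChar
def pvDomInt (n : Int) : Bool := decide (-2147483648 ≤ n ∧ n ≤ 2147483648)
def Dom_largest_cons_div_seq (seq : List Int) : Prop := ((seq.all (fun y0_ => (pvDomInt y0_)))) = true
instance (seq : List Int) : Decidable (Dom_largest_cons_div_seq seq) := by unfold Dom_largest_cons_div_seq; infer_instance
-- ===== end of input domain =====

-- B replaces A's quadratic DP (rescanning all earlier positions per element) by a dict
-- value -> best chain length, querying it only at the divisors of each element, which B
-- enumerates by trial division up to sqrt(|x|); same return value wherever A returns.

-- ===== PORT A =====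
-- inner loop body: 'if seq[i] >= seq[j] and seq[i] % seq[j] == 0: count_arr[i] = max(...)'
def aStep (seq : List Int) (i : Int) (c : List Int) (j : Int) : List Int :=
  if PySem.List.pyGetD seq i 0 ≥ PySem.List.pyGetD seq j 0 ∧
     PySem.Int.mod (PySem.List.pyGetD seq i 0) (PySem.List.pyGetD seq j 0) = 0 then
    PySem.List.pySetD c i (max (PySem.List.pyGetD c i 0) (PySem.List.pyGetD c j 0 + 1))
  else c

-- 'for j in range(i): …'
def aInner (seq : List Int) (c : List Int) (i : Int) : List Int :=
  (PySem.List.pyRange 0 i 1).foldl (aStep seq i) c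

def largest_cons_div_seq (seq : List Int) : Int :=
  let seq_len : Int := PySem.List.len seq
  let count_arr : List Int := (PySem.List.pyRange 0 seq_len 1).map (fun _ => (1 : Int))
  let count_arr := (PySem.List.pyRange 0 seq_len 1).foldl (aInner seq) count_arr
  match PySem.List.max? count_arr (fun y => y) with
  | some m => m
  | none => 0  -- unreachable under Pre_ (Python max([]) raises ValueError)

-- ===== PORT B =====
-- 'if v <= x and v in best: cur = max(cur, best[v] + 1)'
def tryV (best : PySem.Dict Int Int) (x cur v : Int) : Int :=
  if v ≤ x ∧ best.contains v then max cur (best.getD v 0 + 1) else cur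

-- 'while d * d <= m: if m % d == 0: for q in (d, m // d): for v in (q, -q): …; d += 1'
def divLoop (best : PySem.Dict Int Int) (x m dd cur : Int) : Int :=
  if h : dd * dd ≤ m then
    divLoop best x m (dd + 1)
      (if PySem.Int.mod m dd = 0 then
        [dd, -dd, PySem.Int.floordiv m dd, -(PySem.Int.floordiv m dd)].foldl (tryV best x) cur
       else cur)
  else cur
termination_by (m + 1 - dd).toNat
decreasing_by
  have h1 : 2 * dd ≤ m + 1 := by nlinarith [sq_nonneg (dd - 1)]
  have h2 : (0:Int) ≤ m := le_trans (mul_self_nonneg dd) h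
  omega

-- the computation of 'cur' for one element x
def bCur (best : PySem.Dict Int Int) (x : Int) : Int :=
  if x = 0 then
    best.items.foldl (fun cur vc => if vc.1 < 0 then max cur (vc.2 + 1) else cur) 1
  else
    divLoop best x |x| 1 1

-- one iteration of 'for x in seq: …' over the state (best, ans)
def bLoop (st : PySem.Dict Int Int × Int) (x : Int) : PySem.Dict Int Int × Int :=
  let cur := bCur st.1 x
  let d := if st.1.getD x 0 < cur then st.1.insert x cur else st.1
  (d, if cur > st.2 then cur else st.2)

def largest_cons_div_seq_alt (seq : List Int) : Int :=
  (seq.foldl bLoop (PySem.Dict.empty, 0)).2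

-- ===== PRECONDITION & SPEC =====
-- Pre_ excludes exactly the inputs where the Python A raises: the empty list (max([])
-- raises ValueError) and lists where a 0 is followed by some later element ≥ 0
-- (seq[i] % 0 raises ZeroDivisionError); A returns a value on every other list.
def Pre_largest_cons_div_seq (seq : List Int) : Prop :=
  seq ≠ [] ∧ seq.Pairwise (fun a b => ¬(a = 0 ∧ 0 ≤ b))
instance (seq : List Int) : Decidable (Pre_largest_cons_div_seq seq) := by
  unfold Pre_largest_cons_div_seq; infer_instance

def pvWitness_largest_cons_div_seq : List Int := [2, 4, 8]

def Spec_largest_cons_div_seq (seq : List Int) (out : Int) : Prop :=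
  out = largest_cons_div_seq_alt seq
instance (seq : List Int) (out : Int) : Decidable (Spec_largest_cons_div_seq seq out) := by
  unfold Spec_largest_cons_div_seq; infer_instance

-- ===== CLAIM (what is proved, stated in full; the proofs are below) =====
def Claim_equal_largest_cons_div_seq : Prop :=
  ∀ (seq : List Int), Dom_largest_cons_div_seq seq → Pre_largest_cons_div_seq seq →
    Spec_largest_cons_div_seq seq (largest_cons_div_seq seq)

-- ===== LEMMAS AND PROOFS =====

-- The common functional core: "extend the best divisibility chain" as a fold over
-- (value, chain-length) pairs.
def Fstep (x a : Int) (p : Int × Int) : Int :=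
  if x ≥ p.1 ∧ PySem.Int.mod x p.1 = 0 then max a (p.2 + 1) else a

def F (x a : Int) (l : List (Int × Int)) : Int := l.foldl (Fstep x) a

-- the (value, chain length) history of a run, in processing order
def proc (l : List Int) (s : List (Int × Int)) : List (Int × Int) :=
  l.foldl (fun s x => s ++ [(x, F x 1 s)]) s

def M (s : List (Int × Int)) : Int := s.foldl (fun a p => max a p.2) 0

def cnt (s : List (Int × Int)) : List Int := s.map Prod.snd

lemma Fstep_le (x a : Int) (p : Int × Int) : a ≤ Fstep x a p := by
  unfold Fstep; split_ifs <;> omega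

lemma Fstep_comm (x a : Int) (p q : Int × Int) :
    Fstep x (Fstep x a p) q = Fstep x (Fstep x a q) p := by
  unfold Fstep; split_ifs <;> omega

lemma F_singleton (x a : Int) (p : Int × Int) : F x a [p] = Fstep x a p := rfl

lemma F_append (x a : Int) (l₁ l₂ : List (Int × Int)) :
    F x a (l₁ ++ l₂) = F x (F x a l₁) l₂ := by
  simp [F, List.foldl_append]

lemma F_le (x a : Int) (l : List (Int × Int)) : a ≤ F x a l := by
  induction l generalizing a with
  | nil => simp [F]
  | cons p t ih => exact le_trans (Fstep_le x a p) (ih (Fstep x a p))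

lemma F_step_comm (x : Int) (l : List (Int × Int)) (b : Int) (p : Int × Int) :
    F x (Fstep x b p) l = Fstep x (F x b l) p := by
  induction l generalizing b with
  | nil => simp [F]
  | cons q t ih =>
      show F x (Fstep x (Fstep x b p) q) t = _
      rw [Fstep_comm, ih]
      rfl

lemma F_ge_of_mem (x a v c : Int) (l : List (Int × Int)) (hm : (v, c) ∈ l)
    (h1 : x ≥ v) (h2 : PySem.Int.mod x v = 0) : c + 1 ≤ F x a l := by
  obtain ⟨l₁, l₂, rfl⟩ := List.append_of_mem hm
  rw [show l₁ ++ (v, c) :: l₂ = (l₁ ++ [(v, c)]) ++ l₂ by simp]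
  rw [F_append, F_append]
  refine le_trans ?_ (F_le _ _ _)
  rw [F_singleton]
  simp [Fstep, h1, h2]

lemma F_le_bound (x : Int) (l : List (Int × Int)) : ∀ a K, a ≤ K →
    (∀ p ∈ l, x ≥ p.1 ∧ PySem.Int.mod x p.1 = 0 → p.2 + 1 ≤ K) → F x a l ≤ K := by
  induction l with
  | nil => intro a K h _; simpa [F] using h
  | cons p t ih =>
      intro a K ha hp
      show F x (Fstep x a p) t ≤ K
      refine ih (Fstep x a p) K ?_ (fun q hq => hp q (List.mem_cons_of_mem p hq))
      unfold Fstep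
      split_ifs with h
      · exact max_le ha (hp p List.mem_cons_self h)
      · exact ha

lemma Fstep_collapse (x a v c c' : Int) (h : c ≤ c') :
    Fstep x (Fstep x a (v, c)) (v, c') = Fstep x a (v, c') := by
  unfold Fstep; split_ifs <;> omega

-- ===== B's cur computation equals F over the dict items =====

lemma tryV_le (best : PySem.Dict Int Int) (x cur v : Int) : cur ≤ tryV best x cur v := by
  unfold tryV; split_ifs
  · exact le_max_left _ _
  · exact le_refl _

lemma foldl_tryV_le (best : PySem.Dict Int Int) (x : Int) (l : List Int) :
    ∀ cur, cur ≤ l.foldl (tryV best x) cur := by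
  induction l with
  | nil => intro cur; exact le_refl _
  | cons v t ih => intro cur; exact le_trans (tryV_le best x cur v) (ih _)

lemma foldl_tryV_mem_ge (best : PySem.Dict Int Int) (x : Int) (l : List Int) (v c : Int)
    (hg : best.get? v = some c) (hvx : v ≤ x) :
    ∀ cur, v ∈ l → c + 1 ≤ l.foldl (tryV best x) cur := by
  induction l with
  | nil => intro _ hv; cases hv
  | cons w t ih =>
      intro cur hv
      rcases List.mem_cons.mp hv with h | h
      · subst h
        refine le_trans ?_ (foldl_tryV_le best x t (tryV best x cur v))
        unfold tryV
        have hc : best.contains v = true := by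
          rw [PySem.Dict.contains_eq_isSome_get?, hg]; rfl
        rw [if_pos ⟨hvx, hc⟩, PySem.Dict.getD_eq_get?_getD, hg]
        exact le_max_right _ _
      · exact ih (tryV best x cur w) h

lemma foldl_tryV_bound (best : PySem.Dict Int Int) (x : Int) (l : List Int) (K : Int)
    (hK : ∀ v ∈ l, ∀ c, best.get? v = some c → v ≤ x → c + 1 ≤ K) :
    ∀ cur, cur ≤ K → l.foldl (tryV best x) cur ≤ K := by
  induction l with
  | nil => intro cur h; exact h
  | cons w t ih =>
      intro cur hcur
      refine ih (fun v hv => hK v (List.mem_cons_of_mem w hv)) _ ?_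
      unfold tryV
      split_ifs with h
      · rcases h with ⟨hwx, hc⟩
        rw [PySem.Dict.contains_eq_isSome_get?] at hc
        cases hg : best.get? w with
        | none => rw [hg] at hc; cases hc
        | some c =>
            rw [PySem.Dict.getD_eq_get?_getD, hg]
            exact max_le hcur (hK w List.mem_cons_self c hg hwx)
      · exact hcur

lemma divLoop_le (best : PySem.Dict Int Int) (x m : Int) :
    ∀ dd cur, cur ≤ divLoop best x m dd cur := by
  refine divLoop.induct best x m (fun dd cur => cur ≤ divLoop best x m dd cur) ?_ ?_
  · intro dd cur h ih
    rw [divLoop, dif_pos h]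
    refine le_trans ?_ ih
    split_ifs
    · exact foldl_tryV_le best x _ cur
    · exact le_refl _
  · intro dd cur h
    rw [divLoop, dif_neg h]

lemma divLoop_bound (K : Int) (best : PySem.Dict Int Int) (x m : Int)
    (hm : m = |x|) (hx : x ≠ 0)
    (hK : ∀ v c, best.get? v = some c → v ≤ x → PySem.Int.mod x v = 0 → c + 1 ≤ K) :
    ∀ dd cur, 1 ≤ dd → cur ≤ K → divLoop best x m dd cur ≤ K := by
  refine divLoop.induct best x m
    (fun dd cur => 1 ≤ dd → cur ≤ K → divLoop best x m dd cur ≤ K) ?_ ?_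
  · intro dd cur h ih hdd hcur
    rw [divLoop, dif_pos h]
    refine ih (by omega) ?_
    split_ifs with hmod
    · refine foldl_tryV_bound best x _ K ?_ cur hcur
      have hddm : dd ∣ m := (PySem.Int.mod_eq_zero_iff_dvd m dd).mp hmod
      have hddx : dd ∣ x := (dvd_abs dd x).mp (hm ▸ hddm)
      have hq : PySem.Int.floordiv m dd = m / dd :=
        PySem.Int.floordiv_eq_ediv_of_pos (by omega)
      have hqm : (m / dd) ∣ m := ⟨dd, (Int.ediv_mul_cancel hddm).symm⟩
      have hqx : (m / dd) ∣ x := (dvd_abs _ x).mp (hm ▸ hqm)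
      intro v hv c hg hvx
      have hvdvd : v ∣ x := by
        simp only [hq, List.mem_cons, List.not_mem_nil, or_false] at hv
        rcases hv with rfl | rfl | rfl | rfl
        · exact hddx
        · exact (neg_dvd).mpr hddx
        · exact hqx
        · exact (neg_dvd).mpr hqx
      exact hK v c hg hvx ((PySem.Int.mod_eq_zero_iff_dvd x v).mpr hvdvd)
    · exact hcur
  · intro dd cur h _ hcur
    rw [divLoop, dif_neg h]
    exact hcur

lemma divLoop_visit (best : PySem.Dict Int Int) (x m d0 v c : Int)
    (hd0 : 1 ≤ d0) (hsq : d0 * d0 ≤ m) (hmod : PySem.Int.mod m d0 = 0)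
    (hv : v = d0 ∨ v = -d0 ∨ v = PySem.Int.floordiv m d0 ∨ v = -(PySem.Int.floordiv m d0))
    (hg : best.get? v = some c) (hvx : v ≤ x) :
    ∀ dd cur, 1 ≤ dd → dd ≤ d0 → c + 1 ≤ divLoop best x m dd cur := by
  refine divLoop.induct best x m
    (fun dd cur => 1 ≤ dd → dd ≤ d0 → c + 1 ≤ divLoop best x m dd cur) ?_ ?_
  · intro dd cur h ih hdd1 hddle
    rw [divLoop, dif_pos h]
    by_cases hdd0 : dd = d0
    · subst hdd0
      rw [if_pos hmod]
      refine le_trans ?_ (divLoop_le _ _ _ _ _)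
      refine foldl_tryV_mem_ge _ _ _ v c hg hvx cur ?_
      simp only [List.mem_cons, List.not_mem_nil, or_false]
      tauto
    · exact le_trans (ih (by omega) (by omega)) (le_refl _)
  · intro dd cur h hdd1 hddle
    exfalso
    exact h (le_trans (mul_le_mul hddle hddle (by omega) (by omega)) hsq)

lemma exists_d0 (x v : Int) (hx : x ≠ 0) (hdvd : v ∣ x) :
    ∃ d0, 1 ≤ d0 ∧ d0 * d0 ≤ |x| ∧ PySem.Int.mod |x| d0 = 0 ∧
      (v = d0 ∨ v = -d0 ∨ v = PySem.Int.floordiv |x| d0 ∨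
       v = -(PySem.Int.floordiv |x| d0)) := by
  have hv0 : v ≠ 0 := by rintro rfl; exact hx (zero_dvd_iff.mp hdvd)
  set m := |x| with hm
  set q := |v| with hqdef
  have hq1 : 1 ≤ q := Int.one_le_abs (by simpa using hv0)
  have hqm : q ∣ m := (abs_dvd v m).mpr ((dvd_abs v x).mpr hdvd)
  have hm1 : 1 ≤ m := Int.one_le_abs hx
  have hqle : q ≤ m := Int.le_of_dvd (by omega) hqm
  have hvq : v = q ∨ v = -q := by
    rcases abs_choice v with h | h
    · exact Or.inl h.symm
    · exact Or.inr (by omega)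
  by_cases hsq : q * q ≤ m
  · exact ⟨q, hq1, hsq, (PySem.Int.mod_eq_zero_iff_dvd m q).mpr hqm, by tauto⟩
  · refine ⟨m / q, ?_, ?_, ?_, ?_⟩
    · rw [Int.le_ediv_iff_mul_le (by omega)]; omega
    · have hmq : m / q * q = m := Int.ediv_mul_cancel hqm
      have hlt : m / q < q := by nlinarith
      nlinarith [Int.le_ediv_iff_mul_le (a := m) (b := q) (c := 1) (by omega)]
    · exact (PySem.Int.mod_eq_zero_iff_dvd m (m / q)).mpr
        ⟨q, (Int.ediv_mul_cancel hqm).symm⟩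
    · have hd0pos : 0 < m / q := by rw [Int.lt_ediv_iff_mul_lt (by omega) hqm]; omega
      have h2 : m / q * q = m := Int.ediv_mul_cancel hqm
      have hfd : PySem.Int.floordiv m (m / q) = q := by
        rw [PySem.Int.floordiv_eq_ediv_of_pos hd0pos]
        calc m / (m / q) = (m / q * q) / (m / q) := by rw [h2]
          _ = q := Int.mul_ediv_cancel_left q (by omega)
      rw [hfd]
      tauto

lemma bCur_eq_F (best : PySem.Dict Int Int) (x : Int) (hnd : best.keys.Nodup)
    (hz : x = 0 → best.get? 0 = none) : bCur best x = F x 1 best.items := by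
  by_cases hx : x = 0
  · subst hx
    unfold bCur
    rw [if_pos rfl]
    show _ = best.items.foldl (Fstep 0) 1
    apply PySem.List.foldl_congr_mem
    intro cur p hp
    obtain ⟨v, c⟩ := p
    show (if v < 0 then max cur (c + 1) else cur) = Fstep 0 cur (v, c)
    unfold Fstep
    rcases lt_trichotomy v 0 with h | h | h
    · rw [if_pos h, if_pos ⟨by omega, (PySem.Int.mod_eq_zero_iff_dvd 0 v).mpr (dvd_zero v)⟩]
    · subst h
      have := PySem.Dict.get?_of_mem_items best hp hnd
      rw [hz rfl] at this
      cases this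
    · rw [if_neg (by omega), if_neg (by omega)]
  · unfold bCur
    rw [if_neg hx]
    refine le_antisymm ?_ ?_
    · refine divLoop_bound (F x 1 best.items) best x |x| rfl hx ?_ 1 1 (le_refl 1)
        (F_le x 1 best.items)
      intro v c hg hvx hmod
      exact F_ge_of_mem x 1 v c best.items (PySem.Dict.mem_items_of_get?_eq_some best hg)
        hvx hmod
    · refine F_le_bound x best.items 1 _ (divLoop_le best x |x| 1 1) ?_
      intro p hp hcond
      obtain ⟨v, c⟩ := p
      have hg : best.get? v = some c := PySem.Dict.get?_of_mem_items best hp hnd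
      have hdvd : v ∣ x := (PySem.Int.mod_eq_zero_iff_dvd x v).mp hcond.2
      obtain ⟨d0, hd01, hd0sq, hd0mod, hd0v⟩ := exists_d0 x v hx hdvd
      exact divLoop_visit best x |x| d0 v c hd01 hd0sq hd0mod hd0v hg hcond.1 1 1
        (le_refl 1) hd01

-- ===== the B loop invariant =====

def DInv (s : List (Int × Int)) (d : PySem.Dict Int Int) : Prop :=
  d.keys.Nodup ∧ (∀ x a, F x a d.items = F x a s) ∧
  (∀ v, d.contains v = true → v ∈ s.map Prod.fst)

lemma getD_lt_F (d : PySem.Dict Int Int) (x : Int) :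
    d.getD x 0 < F x 1 d.items := by
  rw [PySem.Dict.getD_eq_get?_getD]
  cases hg : d.get? x with
  | none => simpa using lt_of_lt_of_le one_pos (F_le x 1 d.items)
  | some c =>
      have hmem := PySem.Dict.mem_items_of_get?_eq_some d hg
      have h := F_ge_of_mem x 1 x c d.items hmem (le_refl x)
        ((PySem.Int.mod_eq_zero_iff_dvd x x).mpr dvd_rfl)
      simpa using by omega

lemma insert_items_F (d : PySem.Dict Int Int) (x cur : Int) (hnd : d.keys.Nodup)
    (hcur : ∀ c, d.get? x = some c → c ≤ cur) (y a : Int) :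
    F y a (d.insert x cur).items = F y a (d.items ++ [(x, cur)]) := by
  cases hg : d.get? x with
  | none =>
      have hc : d.contains x = false := by
        rw [PySem.Dict.contains_eq_isSome_get?, hg]; rfl
      rw [PySem.Dict.items_insert_of_not_contains d cur hc]
  | some c =>
      have hc : d.contains x = true := by
        rw [PySem.Dict.contains_eq_isSome_get?, hg]; rfl
      have hmem := PySem.Dict.mem_items_of_get?_eq_some d hg
      obtain ⟨l₁, l₂, hdec⟩ := List.append_of_mem hmem
      have hkeys : d.keys = l₁.map Prod.fst ++ x :: l₂.map Prod.fst := by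
        show d.items.map Prod.fst = _
        rw [hdec]; simp
      rw [hkeys] at hnd
      have hx1 : ∀ p ∈ l₁, p.1 ≠ x := by
        intro p hp hpx
        have : x ∈ l₁.map Prod.fst := List.mem_map.mpr ⟨p, hp, hpx⟩
        have hdisj := (List.nodup_append.mp hnd).2.2
        exact hdisj x this x (by simp) rfl
      have hx2 : ∀ p ∈ l₂, p.1 ≠ x := by
        intro p hp hpx
        have hnd2 := (List.nodup_append.mp hnd).2.1
        have : x ∈ l₂.map Prod.fst := List.mem_map.mpr ⟨p, hp, hpx⟩
        exact (List.nodup_cons.mp hnd2).1 this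
      rw [PySem.Dict.items_insert_of_contains d cur hc, hdec]
      have hmap : (l₁ ++ (x, c) :: l₂).map
          (fun p => if (p.1 == x) = true then (x, cur) else p)
          = l₁ ++ (x, cur) :: l₂ := by
        rw [List.map_append, List.map_cons]
        congr 1
        · exact List.map_congr_left (fun p hp => by
            simp [if_neg (by simpa using hx1 p hp)]) |>.trans (List.map_id l₁)
        · congr 1
          · simp
          · exact List.map_congr_left (fun p hp => by
              simp [if_neg (by simpa using hx2 p hp)]) |>.trans (List.map_id l₂)
      rw [hmap]
      have hc_le : c ≤ cur := hcur c hg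
      rw [show l₁ ++ (x, cur) :: l₂ = (l₁ ++ [(x, cur)]) ++ l₂ by simp,
          show (l₁ ++ (x, c) :: l₂) ++ [(x, cur)]
             = ((l₁ ++ [(x, c)]) ++ l₂) ++ [(x, cur)] by simp]
      rw [F_append, F_append, F_append, F_append, F_append, F_singleton, F_singleton,
          F_singleton, F_step_comm, F_step_comm]
      exact (Fstep_collapse y (F y (F y a l₁) l₂) x c cur hc_le).symm

lemma M_append (s : List (Int × Int)) (p : Int × Int) :
    M (s ++ [p]) = max (M s) p.2 := by
  simp [M, List.foldl_append]

lemma bLoop_inv (s : List (Int × Int)) (d : PySem.Dict Int Int) (ans x : Int)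
    (hinv : DInv s d) (hans : ans = M s) (hzx : x = 0 → 0 ∉ s.map Prod.fst) :
    DInv (s ++ [(x, F x 1 s)]) (bLoop (d, ans) x).1 ∧
      (bLoop (d, ans) x).2 = M (s ++ [(x, F x 1 s)]) := by
  obtain ⟨hnd, hF, hkeys⟩ := hinv
  have hz : x = 0 → d.get? 0 = none := by
    intro hx0
    cases hg : d.get? 0 with
    | none => rfl
    | some c =>
        exfalso
        refine hzx hx0 (hkeys 0 ?_)
        rw [PySem.Dict.contains_eq_isSome_get?, hg]; rfl
  have hcureq : bCur d x = F x 1 s := (bCur_eq_F d x hnd hz).trans (hF x 1)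
  have hlt : d.getD x 0 < F x 1 s := by
    have := getD_lt_F d x
    rwa [hF x 1] at this
  have hstep : bLoop (d, ans) x
      = (d.insert x (F x 1 s), if F x 1 s > ans then F x 1 s else ans) := by
    simp only [bLoop, hcureq]
    rw [if_pos hlt]
  rw [hstep]
  have hcur' : ∀ c, d.get? x = some c → c ≤ F x 1 s := by
    intro c hg
    have hmem := PySem.Dict.mem_items_of_get?_eq_some d hg
    have := F_ge_of_mem x 1 x c d.items hmem (le_refl x)
      ((PySem.Int.mod_eq_zero_iff_dvd x x).mpr dvd_rfl)
    rw [hF x 1] at this; omega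
  refine ⟨⟨PySem.Dict.nodup_keys_insert d x (F x 1 s) hnd, ?_, ?_⟩, ?_⟩
  · intro y a
    rw [insert_items_F d x (F x 1 s) hnd hcur' y a, F_append, F_singleton, hF y a,
        F_append, F_singleton]
  · intro v hv
    rw [PySem.Dict.contains_insert] at hv
    rcases Bool.or_eq_true_iff.mp hv with h | h
    · have : v = x := by simpa using h
      subst this
      simp
    · rw [List.map_append]
      exact List.mem_append_left _ (hkeys v h)
  · rw [M_append, hans]
    simp only []
    split_ifs <;> omega

lemma B_run (l : List Int) : ∀ (s : List (Int × Int)) (d : PySem.Dict Int Int) (ans : Int),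
    DInv s d → ans = M s → (0 ∈ s.map Prod.fst → ∀ y ∈ l, y < 0) →
    l.Pairwise (fun a b => ¬(a = 0 ∧ 0 ≤ b)) →
    DInv (proc l s) (l.foldl bLoop (d, ans)).1 ∧ (l.foldl bLoop (d, ans)).2 = M (proc l s) := by
  induction l with
  | nil => intro s d ans h1 h2 _ _; exact ⟨h1, h2.symm ▸ rfl⟩
  | cons x t ih =>
      intro s d ans h1 h2 hz0 hp
      obtain ⟨hhead, htail⟩ := List.pairwise_cons.mp hp
      have hzx : x = 0 → 0 ∉ s.map Prod.fst := by
        intro hx0 hmem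
        have := hz0 hmem x List.mem_cons_self
        omega
      have hb := bLoop_inv s d ans x h1 h2 hzx
      have hz0' : 0 ∈ (s ++ [(x, F x 1 s)]).map Prod.fst → ∀ y ∈ t, y < 0 := by
        intro hmem y hy
        rw [List.map_append, List.mem_append] at hmem
        rcases hmem with h | h
        · exact hz0 h y (List.mem_cons_of_mem x hy)
        · have hx0 : x = 0 := by
            have h' : (0:Int) = x := by simpa using h
            omega
          have := hhead y hy
          omega
      have hpstep : proc (x :: t) s = proc t (s ++ [(x, F x 1 s)]) := rfl
      rw [hpstep]
      have := ih (s ++ [(x, F x 1 s)]) (bLoop (d, ans) x).1 (bLoop (d, ans) x).2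
        hb.1 hb.2 hz0' htail
      simpa using this

lemma B_eq (seq : List Int) (hp : seq.Pairwise (fun a b => ¬(a = 0 ∧ 0 ≤ b))) :
    largest_cons_div_seq_alt seq = M (proc seq []) := by
  have h := B_run seq [] PySem.Dict.empty 0
    ⟨by simp [PySem.Dict.keys, PySem.Dict.empty],
     fun x a => rfl,
     fun v hv => by simp [PySem.Dict.contains_empty] at hv⟩
    rfl (by simp) hp
  simpa [largest_cons_div_seq_alt] using h.2

-- ===== A side =====

lemma proc_append (l : List Int) (x : Int) (s : List (Int × Int)) :
    proc (l ++ [x]) s = proc l s ++ [(x, F x 1 (proc l s))] := by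
  simp [proc, List.foldl_append]

lemma proc_fst (l : List Int) : ∀ s, (proc l s).map Prod.fst = s.map Prod.fst ++ l := by
  induction l with
  | nil => intro s; simp [proc]
  | cons x t ih =>
      intro s
      show (proc t (s ++ [(x, F x 1 s)])).map Prod.fst = _
      rw [ih]; simp

lemma proc_length (l : List Int) (s : List (Int × Int)) :
    (proc l s).length = s.length + l.length := by
  have := congrArg List.length (proc_fst l s)
  simpa using this

lemma proc_prefix (l : List Int) : ∀ s, ∃ r, proc l s = s ++ r := by
  induction l with
  | nil => intro s; exact ⟨[], by simp [proc]⟩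
  | cons x t ih =>
      intro s
      obtain ⟨r, hr⟩ := ih (s ++ [(x, F x 1 s)])
      exact ⟨(x, F x 1 s) :: r, by
        show proc t (s ++ [(x, F x 1 s)]) = _
        rw [hr]; simp⟩

lemma range_fold_eq_F (x : Int) (s : List (Int × Int)) (vs cs : List Int)
    (hv : ∀ j, j < s.length → vs.getD j 0 = (s.map Prod.fst).getD j 0)
    (hc : ∀ j, j < s.length → cs.getD j 0 = (s.map Prod.snd).getD j 0) : ∀ a,
    (List.range s.length).foldl
      (fun acc j => if x ≥ vs.getD j 0 ∧ PySem.Int.mod x (vs.getD j 0) = 0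
                    then max acc (cs.getD j 0 + 1) else acc) a
      = F x a s := by
  induction s using List.reverseRecOn with
  | nil => intro a; simp [F]
  | append_singleton s p ih =>
      intro a
      rw [List.length_append, List.length_singleton, List.range_succ, List.foldl_append,
          F_append, F_singleton]
      have hvp : vs.getD s.length 0 = p.1 := by
        rw [hv s.length (by simp)]
        simp [List.getD_eq_getElem?_getD]
      have hcp : cs.getD s.length 0 = p.2 := by
        rw [hc s.length (by simp)]
        simp [List.getD_eq_getElem?_getD]
      have hrec := ih (fun j hj => by
          rw [hv j (by simp; omega)]
          rw [List.map_append, List.getD_append _ _ _ _ (by simpa using hj)])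
        (fun j hj => by
          rw [hc j (by simp; omega)]
          rw [List.map_append, List.getD_append _ _ _ _ (by simpa using hj)]) a
      rw [List.foldl_cons, List.foldl_nil, hrec, hvp, hcp]
      rfl

lemma getD_set_self (c : List Int) (i : Nat) (v : Int) (h : i < c.length) :
    (c.set i v).getD i 0 = v := by
  simp [List.getD_eq_getElem?_getD, List.getElem?_set_self (by simpa using h)]

lemma getD_set_ne (c : List Int) (i j : Nat) (v : Int) (h : i ≠ j) :
    (c.set i v).getD j 0 = c.getD j 0 := by
  simp [List.getD_eq_getElem?_getD, List.getElem?_set_ne h]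

lemma set_getD_self (c : List Int) (i : Nat) (h : i < c.length) :
    c.set i (c.getD i 0) = c := by
  apply List.ext_getElem?
  intro j
  by_cases hj : i = j
  · subst hj
    rw [List.getElem?_set_self (by simpa using h)]
    simp [List.getD_eq_getElem?_getD, List.getElem?_eq_getElem h]
  · rw [List.getElem?_set_ne hj]

lemma inner_run (seq : List Int) (i : Nat) : ∀ (m : Nat) (c : List Int), m ≤ i → i < c.length →
    (List.range m).foldl
      (fun c' j => if seq.getD i 0 ≥ seq.getD j 0 ∧
                      PySem.Int.mod (seq.getD i 0) (seq.getD j 0) = 0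
                   then c'.set i (max (c'.getD i 0) (c'.getD j 0 + 1)) else c') c
    = c.set i ((List.range m).foldl
        (fun a j => if seq.getD i 0 ≥ seq.getD j 0 ∧
                       PySem.Int.mod (seq.getD i 0) (seq.getD j 0) = 0
                    then max a (c.getD j 0 + 1) else a) (c.getD i 0)) := by
  intro m
  induction m with
  | zero =>
      intro c _ hi
      simpa using (set_getD_self c i hi).symm
  | succ m ih =>
      intro c hm hi
      rw [List.range_succ, List.foldl_append, List.foldl_append, List.foldl_cons,
          List.foldl_cons, List.foldl_nil, List.foldl_nil, ih c (by omega) hi]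
      by_cases hP : seq.getD i 0 ≥ seq.getD m 0 ∧
          PySem.Int.mod (seq.getD i 0) (seq.getD m 0) = 0
      · rw [if_pos hP, if_pos hP, List.set_set,
            getD_set_self c i _ hi, getD_set_ne c i m _ (by omega)]
      · rw [if_neg hP, if_neg hP]

lemma aInner_eq_nat (seq : List Int) (c : List Int) (k : Nat) :
    aInner seq c (k : Int)
    = (List.range k).foldl
        (fun c' j => if seq.getD k 0 ≥ seq.getD j 0 ∧
                        PySem.Int.mod (seq.getD k 0) (seq.getD j 0) = 0
                     then c'.set k (max (c'.getD k 0) (c'.getD j 0 + 1)) else c') c := by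
  unfold aInner
  rw [PySem.List.pyRange_zero_nat k, List.foldl_map]
  apply PySem.List.foldl_congr_mem
  intro acc j _
  simp [aStep, PySem.List.pyGetD_natCast, PySem.List.pySetD_natCast]

lemma A_run (seq : List Int) : ∀ k, k ≤ seq.length →
    (PySem.List.pyRange 0 (k : Int) 1).foldl (aInner seq)
        ((PySem.List.pyRange 0 (seq.length : Int) 1).map (fun _ => (1 : Int)))
    = cnt (proc (seq.take k) []) ++ List.replicate (seq.length - k) 1 := by
  have hinit : (PySem.List.pyRange 0 (seq.length : Int) 1).map (fun _ => (1 : Int))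
      = List.replicate seq.length (1 : Int) := by
    rw [PySem.List.pyRange_zero_nat, List.map_map]
    simp [Function.comp_def, List.map_const']
  intro k
  induction k with
  | zero =>
      intro _
      rw [show ((0 : Nat) : Int) = 0 from rfl, PySem.List.pyRange_one_eq_nil (le_refl 0)]
      simp [proc, cnt, hinit]
  | succ k ih =>
      intro hk1
      have hk : k < seq.length := by omega
      have hcast : ((k + 1 : Nat) : Int) = (k : Int) + 1 := by push_cast; ring
      rw [hcast, PySem.List.pyRange_one_succ_right (by positivity), List.foldl_append,
          List.foldl_cons, List.foldl_nil, ih (by omega), aInner_eq_nat]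
      set s := proc (seq.take k) [] with hs
      have hslen : s.length = k := by
        rw [hs, proc_length]
        simp [Nat.min_eq_left (le_of_lt hk)]
      have hcntlen : (cnt s).length = k := by simp [cnt, hslen]
      set c := cnt s ++ List.replicate (seq.length - k) 1 with hc
      have hclen : c.length = seq.length := by
        rw [hc, List.length_append, hcntlen, List.length_replicate]
        omega
      rw [inner_run seq k k c (le_refl k) (by omega)]
      have hacc : c.getD k 0 = 1 := by
        rw [hc, List.getD_append_right _ _ _ _ (hcntlen.le), hcntlen]
        simp [List.getD_eq_getElem?_getD, hk]
      have hfold : (List.range k).foldl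
          (fun a j => if seq.getD k 0 ≥ seq.getD j 0 ∧
              PySem.Int.mod (seq.getD k 0) (seq.getD j 0) = 0
            then max a (c.getD j 0 + 1) else a) (c.getD k 0)
          = F (seq.getD k 0) 1 s := by
        rw [hacc]
        have hrf := range_fold_eq_F (seq.getD k 0) s seq c
          (fun j hj => by
            have hjk : j < k := by omega
            rw [hs, proc_fst]
            simp only [List.map_nil, List.nil_append]
            rw [List.getD_eq_getElem?_getD, List.getD_eq_getElem?_getD,
                List.getElem?_take, if_pos hjk])
          (fun j hj => by
            have hjk : j < k := by omega
            rw [hc, List.getD_append _ _ _ _ (by omega)]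
            rfl) 1
        rw [hslen] at hrf
        exact hrf
      rw [hfold]
      have htake : seq.take (k + 1) = seq.take k ++ [seq.getD k 0] := by
        rw [List.take_add_one]
        congr 1
        rw [List.getElem?_eq_getElem hk]
        simp [List.getD_eq_getElem?_getD, List.getElem?_eq_getElem hk]
      rw [htake, proc_append, ← hs]
      have hcnt2 : cnt (s ++ [(seq.getD k 0, F (seq.getD k 0) 1 s)])
          = cnt s ++ [F (seq.getD k 0) 1 s] := by simp [cnt]
      rw [hcnt2, hc, List.set_append_right _ _ (hcntlen.le), hcntlen]
      rw [show seq.length - k = (seq.length - (k + 1)) + 1 by omega, List.replicate_succ]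
      simp

lemma A_eq (seq : List Int) :
    largest_cons_div_seq seq
    = match PySem.List.max? (cnt (proc seq [])) (fun y => y) with
      | some m => m | none => 0 := by
  show (match PySem.List.max? ((PySem.List.pyRange 0 (PySem.List.len seq) 1).foldl (aInner seq)
      ((PySem.List.pyRange 0 (PySem.List.len seq) 1).map (fun _ => (1 : Int)))) (fun y => y) with
    | some m => m | none => 0) = _
  rw [PySem.List.len_eq, A_run seq seq.length (le_refl _)]
  simp

-- ===== VERDICT (by name: the statement is the Claim_ definition above) =====
theorem largest_cons_div_seq_spec : Claim_equal_largest_cons_div_seq := by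
  intro seq _ hpre
  unfold Spec_largest_cons_div_seq
  obtain ⟨hne, hpw⟩ := hpre
  rw [A_eq, B_eq seq hpw]
  cases seq with
  | nil => exact absurd rfl hne
  | cons h t =>
      have h1 : proc (h :: t) [] = proc t [(h, 1)] := rfl
      obtain ⟨r, hr⟩ := proc_prefix t [(h, 1)]
      rw [h1, hr]
      show (match PySem.List.max? (cnt ((h, 1) :: r)) (fun y => y) with
        | some m => m | none => 0) = M ((h, 1) :: r)
      rw [show cnt ((h, 1) :: r) = 1 :: r.map Prod.snd from rfl,
          PySem.List.max?_id_cons]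
      show (r.map Prod.snd).foldl max 1 = r.foldl (fun a p => max a p.2) (max 0 1)
      rw [List.foldl_map]
      norm_num
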